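-- pv_equiv track=rewrite | github.com/muxintong/break-algorithm | dynamic planning/dp-func/514.freedom-trail.py | findRotateSteps
-- ===== SOURCE A (Python) =====
-- def findRotateSteps(ring: str, key: str) -> int:
--     m = len(ring)
--     n = len(key)
--
--     memory = [[0] * n for row in range(m)]
--     char_indexs = {}
--     for i in range(m):
--         char_indexs.setdefault(ring[i], [i])
--         char_indexs[ring[i]].append(i)
--
--     # dp方法含义：
--     # 当圆盘指针指向 ring[i] 时，输入字符串 key[j..] 至少需要 dp(ring, i, key, j) 次操作。
--     def dp(i: int, j: int) -> int:
--         # base case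
--         if j == n: return 0
--
--         # before recursive:find in memory
--         if memory[i][j] != 0: return memory[i][j]
--
--         # recursive
--         res = 99999
--         for k in char_indexs.get(key[j]):
--             # 拨动指针的次数
--             counts = abs(k - i)
--             # 顺时针 or 逆时针
--             counts = min(counts, m - counts)
--             # 将指针拨到ring[k]，继续输入key[j+1:]
--             subproblem = dp(k, j + 1)
--             # 选择整体操作数最少的，因按动按钮也是一次操作故加1
--             res = min(res, counts + subproblem + 1)
--
--         # after recursive:write in memory
--         memory[i][j] = res
--
--         return res
--
--     return dp(0, 0)
-- ===== SOURCE B (Python) =====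
-- def findRotateSteps(ring: str, key: str) -> int:
--     # Bottom-up DP over suffixes of key (iterative table instead of memoized recursion).
--     if not key:
--         return 0
--     m = len(ring)
--     pos = {}
--     for i, c in enumerate(ring):
--         pos.setdefault(c, []).append(i)
--     cost = [0] * m  # cost[p] = min ops to type the processed suffix with the pointer at p
--     for ch in reversed(key):
--         idxs = pos[ch]
--         new = []
--         for p in range(m):
--             best = 99999
--             for q in idxs:
--                 d = abs(p - q)
--                 best = min(best, min(d, m - d) + cost[q] + 1)
--             new.append(best)
--         cost = new
--     return cost[0]
-- ===== Notes on version B (the rewrite author's own statement) =====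
-- stated objective: alternative
-- what changed: Replaces the memoized top-down recursion over a preallocated m*n table (and the duplicate-first-index dict quirk) with an iterative bottom-up DP that sweeps key from the last character to the first, maintaining one cost array over ring positions.
import Mathlib
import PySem

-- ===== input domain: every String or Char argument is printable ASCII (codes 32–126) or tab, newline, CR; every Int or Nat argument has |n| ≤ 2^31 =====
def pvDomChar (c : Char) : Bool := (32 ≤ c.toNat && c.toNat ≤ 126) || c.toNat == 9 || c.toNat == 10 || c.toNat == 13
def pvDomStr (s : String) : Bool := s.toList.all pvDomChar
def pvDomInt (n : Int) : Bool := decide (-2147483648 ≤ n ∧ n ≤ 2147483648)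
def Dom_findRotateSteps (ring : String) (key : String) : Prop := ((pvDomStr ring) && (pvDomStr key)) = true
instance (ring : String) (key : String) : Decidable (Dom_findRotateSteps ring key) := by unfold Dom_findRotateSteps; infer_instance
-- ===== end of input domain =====

-- B replaces A's memoized top-down recursion (with its m*n memo table and duplicated-first-index
-- dict entries) by an iterative bottom-up DP sweeping key from its last character to its first,
-- maintaining one cost array over ring positions; same values on the stated domain (objective: alternative).

-- ===== PORT A =====

-- char_indexs: for i in range(m): setdefault(ring[i], [i]); char_indexs[ring[i]].append(i)
def buildA (rs : List Char) : PySem.Dict Char (List Int) :=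
  (PySem.List.pyRange 0 rs.length 1).foldl (fun d i =>
    let c := PySem.List.pyGetD rs i ' '   -- ring[i], i always in range here
    (d.setdefault c [i]).modify c [] (fun l => l ++ [i])) PySem.Dict.empty

mutual
-- dp(i, j) threading the memo table 'mem' (memory) through the computation
def dpA (ci : PySem.Dict Char (List Int)) (ks : List Char) (m : Int) (n : Nat)
    (i : Int) (j : Nat) (mem : List (List Int)) : Int × List (List Int) :=
  if j = n then (0, mem)
  else if hj : j < n then
    let cached := PySem.List.pyGetD (PySem.List.pyGetD mem i []) (j : Int) 0  -- memory[i][j]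
    if cached ≠ 0 then (cached, mem)
    else
      let c := PySem.List.pyGetD ks (j : Int) ' '   -- key[j], j < n
      let lst := (ci.get? c).getD []   -- char_indexs.get(key[j]); Python raises TypeError on None — excluded by Pre_
      let rm := loopA ci ks m n i j hj lst 99999 mem
      -- memory[i][j] = res
      (rm.1, PySem.List.pySetD rm.2 i (PySem.List.pySetD (PySem.List.pyGetD rm.2 i []) (j : Int) rm.1))
  else (0, mem)   -- unreachable totality guard: dp is only ever invoked with j ≤ n
termination_by (n - j, 1, 0)

-- the 'for k in char_indexs.get(key[j])' loop, accumulator res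
def loopA (ci : PySem.Dict Char (List Int)) (ks : List Char) (m : Int) (n : Nat)
    (i : Int) (j : Nat) (hj : j < n) :
    List Int → Int → List (List Int) → Int × List (List Int)
  | [], res, mem => (res, mem)
  | k :: rest, res, mem =>
    let counts := |k - i|
    let counts2 := min counts (m - counts)
    let sm := dpA ci ks m n k (j + 1) mem
    loopA ci ks m n i j hj rest (min res (counts2 + sm.1 + 1)) sm.2
termination_by lst res mem => (n - j, 0, lst.length)
end

def findRotateSteps (ring : String) (key : String) : Int :=
  let rs := ring.toList
  let ks := key.toList
  let m := rs.length
  let n := ks.length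
  let memory := List.replicate m (List.replicate n (0 : Int))
  let ci := buildA rs
  (dpA ci ks (m : Int) n 0 0 memory).1

-- ===== PORT B =====

-- pos: for i, c in enumerate(ring): pos.setdefault(c, []).append(i)
-- (Dict.modify c [] (· ++ [i]) IS d[c] = d.get(c, []) + [i], i.e. setdefault-then-append)
def buildB (rs : List Char) : PySem.Dict Char (List Int) :=
  (PySem.List.enumerate rs 0).foldl (fun d p => d.modify p.2 [] (fun l => l ++ [p.1])) PySem.Dict.empty

def findRotateSteps_alt (ring : String) (key : String) : Int :=
  let ks := key.toList
  if ks.isEmpty then 0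
  else
    let rs := ring.toList
    let m := rs.length
    let pos := buildB rs
    let cost := ks.reverse.foldl (fun cost ch =>
      let idxs := (pos.get? ch).getD []   -- pos[ch]; Python raises KeyError on a missing char — excluded by Pre_
      (List.range m).map (fun p : Nat =>  -- for p in range(m): new.append(best)
        idxs.foldl (fun best q =>
          let d := |(p : Int) - q|
          min best (min d ((m : Int) - d) + PySem.List.pyGetD cost q 0 + 1)) 99999))
      (List.replicate m (0 : Int))
    PySem.List.pyGetD cost 0 0   -- cost[0]; m ≥ 1 here since key is nonempty and its chars occur in ring

-- ===== PRECONDITION & SPEC =====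
-- Pre_ excludes exactly the inputs on which A raises: a key character absent from ring makes
-- char_indexs.get return None and A's 'for k in None' raise TypeError.
def Pre_findRotateSteps (ring : String) (key : String) : Prop :=
  (key.toList.all (fun c => ring.toList.contains c)) = true
instance (ring : String) (key : String) : Decidable (Pre_findRotateSteps ring key) := by
  unfold Pre_findRotateSteps; infer_instance

def pvWitness_findRotateSteps : String × String := ("ab", "b")

def Spec_findRotateSteps (ring : String) (key : String) (out : Int) : Prop := out = findRotateSteps_alt ring key
instance (ring : String) (key : String) (out : Int) : Decidable (Spec_findRotateSteps ring key out) := by unfold Spec_findRotateSteps; infer_instance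

-- ===== CLAIM (what is proved, stated in full; the proofs are below) =====
def Claim_equal_findRotateSteps : Prop := ∀ (ring : String) (key : String), Dom_findRotateSteps ring key → Pre_findRotateSteps ring key → Spec_findRotateSteps ring key (findRotateSteps ring key)

-- ===== LEMMAS AND PROOFS =====

-- index/char pairs: the first components of those pairs whose char is c
def idxsP (ps : List (Int × Char)) (c : Char) : List Int :=
  (ps.filter (fun p => p.2 == c)).map (fun p => p.1)

-- the positions of c in rs, as Python ints in increasing order
def idxsOf (rs : List Char) (c : Char) : List Int := idxsP (PySem.List.enumerate rs 0) c

-- the common mathematical recurrence both programs compute: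
-- costF rs ks p = min ops to type ks with the pointer at position p (seeded with A's 99999 cap)
def costF (rs : List Char) : List Char → Int → Int
  | [], _ => 0
  | c :: rest, p =>
    ((idxsOf rs c).map (fun q =>
      min |q - p| ((rs.length : Int) - |q - p|) + costF rs rest q + 1)).foldl min 99999

def entryM (mem : List (List Int)) (i j : Nat) : Int := (mem.getD i []).getD j 0

def ValidMem (rs ks : List Char) (mem : List (List Int)) : Prop :=
  mem.length = rs.length ∧ (∀ r ∈ mem, r.length = ks.length) ∧
  ∀ i j, i < rs.length → j < ks.length →
    entryM mem i j = 0 ∨ entryM mem i j = costF rs (ks.drop j) (i : Int)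

def stepA (d : PySem.Dict Char (List Int)) (p : Int × Char) : PySem.Dict Char (List Int) :=
  (d.setdefault p.2 [p.1]).modify p.2 [] (fun l => l ++ [p.1])

def stepB (d : PySem.Dict Char (List Int)) (p : Int × Char) : PySem.Dict Char (List Int) :=
  d.modify p.2 [] (fun l => l ++ [p.1])

-- A's dict quirk: the first occurrence index is stored twice
def dupHead (l : List Int) : List Int := match l with | [] => [] | q :: r => q :: q :: r

lemma foldl_min_dup (f : Int → Int) (l : List Int) (a q : Int) :
    ((q :: q :: l).foldl (fun b x => min b (f x)) a) = ((q :: l).foldl (fun b x => min b (f x)) a) := by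
  simp only [List.foldl_cons]
  rw [min_assoc, min_self]

lemma mem_idxsOf {rs : List Char} {c : Char} {q : Int} (h : q ∈ idxsOf rs c) :
    ∃ k : Nat, k < rs.length ∧ q = (k : Int) := by
  unfold idxsOf idxsP at h
  simp only [List.mem_map, List.mem_filter, PySem.List.mem_enumerate_iff] at h
  obtain ⟨p, ⟨⟨k, hk, rfl⟩, -⟩, rfl⟩ := h
  exact ⟨k, hk, by simp⟩

lemma idxsOf_ne_nil {rs : List Char} {c : Char} (h : c ∈ rs) : idxsOf rs c ≠ [] := by
  obtain ⟨k, hk, hc⟩ := List.mem_iff_getElem.mp h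
  apply List.ne_nil_of_mem (a := (k : Int))
  unfold idxsOf idxsP
  simp only [List.mem_map, List.mem_filter, PySem.List.mem_enumerate_iff]
  exact ⟨((k : Int), c), ⟨⟨k, hk, by simp [hc]⟩, by simp⟩, rfl⟩

lemma getD_set_int {α : Type} (l : List α) (i : Nat) (v : α) (i' : Nat) (d : α) (h : i < l.length) :
    (l.set i v).getD i' d = if i' = i then v else l.getD i' d := by
  by_cases h' : i' = i
  · subst h'; simp [List.getD_eq_getElem?_getD, List.getElem?_set_self', List.getElem?_eq_getElem h]
  · simp [List.getD_eq_getElem?_getD, h', List.getElem?_set_ne (Ne.symm h')]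

lemma foldl_stepA_getD : ∀ (ps : List (Int × Char)) (d : PySem.Dict Char (List Int)) (c : Char),
    ((ps.foldl stepA d).getD c []) =
      if d.contains c then d.getD c [] ++ idxsP ps c else dupHead (idxsP ps c) := by
  intro ps
  induction ps with
  | nil =>
    intro d c
    simp only [List.foldl_nil, idxsP, List.filter_nil, List.map_nil, List.append_nil]
    by_cases h : d.contains c
    · simp [h]
    · rw [if_neg (by simp [h]), PySem.Dict.getD_of_not_contains _ _ (by simpa using h)]
      rfl
  | cons p t ih =>
    intro d c
    rw [List.foldl_cons, ih]
    have hcont : (stepA d p).contains c = (c == p.2 || d.contains c) := by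
      unfold stepA
      rw [PySem.Dict.contains_modify, PySem.Dict.contains_setdefault]
      cases hb : (c == p.2) <;> simp [hb]
    have hidx : idxsP (p :: t) c = (if c = p.2 then [p.1] else []) ++ idxsP t c := by
      unfold idxsP
      rcases eq_or_ne p.2 c with h | h
      · rw [List.filter_cons, if_pos (by simp [h]), if_pos h.symm]
        simp
      · rw [List.filter_cons, if_neg (by simp [h]), if_neg (Ne.symm h)]
        simp
    by_cases hc : c = p.2
    · have hget : (stepA d p).getD c [] =
          (if d.contains c then d.getD c [] ++ [p.1] else [p.1, p.1]) := by
        unfold stepA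
        rw [hc, PySem.Dict.getD_modify, if_pos rfl, PySem.Dict.getD_setdefault_self]
        by_cases h : d.contains p.2
        · rw [if_pos h]
          rcases hs : d.get? p.2 with _ | v
          · exfalso
            have := (PySem.Dict.get?_eq_none_iff_contains d p.2).mp hs
            rw [h] at this
            cases this
          · rw [PySem.Dict.getD_of_get?_eq_some _ _ hs, PySem.Dict.getD_of_get?_eq_some _ _ hs]
        · have hfalse : d.contains p.2 = false := by simpa using h
          rw [if_neg h, PySem.Dict.getD_of_not_contains _ _ hfalse]
          rfl
      rw [hget, hcont, hidx, if_pos hc]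
      have hb : (c == p.2) = true := by simpa using hc
      rw [hb]
      simp only [Bool.true_or, if_true]
      by_cases h : d.contains c
      · simp [h, List.append_assoc]
      · have hf : d.contains c = false := by simpa using h
        rw [if_neg (by simp [hf]), if_neg (by simp [hf])]
        cases idxsP t c <;> rfl
    · have hget : (stepA d p).getD c [] = d.getD c [] := by
        unfold stepA
        rw [PySem.Dict.getD_modify, if_neg hc, PySem.Dict.getD_eq_get?_getD,
            PySem.Dict.get?_setdefault_of_ne _ _ hc, ← PySem.Dict.getD_eq_get?_getD]
      rw [hget, hcont, hidx, if_neg hc]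
      have hb : (c == p.2) = false := beq_eq_false_iff_ne.mpr hc
      rw [hb]
      simp

lemma foldl_stepB_getD : ∀ (ps : List (Int × Char)) (d : PySem.Dict Char (List Int)) (c : Char),
    ((ps.foldl stepB d).getD c []) = d.getD c [] ++ idxsP ps c := by
  intro ps
  induction ps with
  | nil => intro d c; simp [idxsP]
  | cons p t ih =>
    intro d c
    rw [List.foldl_cons, ih]
    unfold stepB
    rw [PySem.Dict.getD_modify]
    unfold idxsP
    by_cases h : c = p.2
    · subst h
      simp [List.filter_cons, List.append_assoc]
    · have hb : (p.2 == c) = false := beq_eq_false_iff_ne.mpr (Ne.symm h)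
      simp [List.filter_cons, hb, if_neg h]

lemma buildA_getD (rs : List Char) (c : Char) : (buildA rs).getD c [] = dupHead (idxsOf rs c) := by
  have : buildA rs = (PySem.List.enumerate rs 0).foldl stepA PySem.Dict.empty := by
    unfold buildA
    rw [PySem.List.enumerate_eq_map_pyRange rs ' ', List.foldl_map]
    simp [stepA, PySem.List.len]
  rw [this, foldl_stepA_getD]
  simp [idxsOf, PySem.Dict.contains_empty]

lemma buildB_getD (rs : List Char) (c : Char) : (buildB rs).getD c [] = idxsOf rs c := by
  unfold buildB
  have : (PySem.List.enumerate rs 0).foldl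
      (fun d p => d.modify p.2 [] (fun l => l ++ [p.1])) PySem.Dict.empty
      = (PySem.List.enumerate rs 0).foldl stepB PySem.Dict.empty := rfl
  rw [this, foldl_stepB_getD]
  simp [idxsOf]

lemma valid_set (rs ks : List Char) (mem : List (List Int)) (i j : Nat) (res : Int)
    (hv : ValidMem rs ks mem) (hi : i < rs.length) (hj : j < ks.length)
    (hres : res = costF rs (ks.drop j) (i : Int)) :
    ValidMem rs ks (mem.set i ((mem.getD i []).set j res)) := by
  obtain ⟨hlen, hrows, hent⟩ := hv
  have hil : i < mem.length := by omega
  have hrowi : (mem.getD i []).length = ks.length := by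
    have hmem : mem.getD i [] ∈ mem := by
      rw [List.getD_eq_getElem?_getD, List.getElem?_eq_getElem hil]
      exact List.getElem_mem _
    exact hrows _ hmem
  refine ⟨by simp [hlen], ?_, ?_⟩
  · intro r hr
    rcases List.mem_or_eq_of_mem_set hr with h | h
    · exact hrows r h
    · subst h
      rw [List.length_set]
      exact hrowi
  · intro i' j' hi' hj'
    unfold entryM
    rw [getD_set_int _ _ _ _ _ hil]
    by_cases h : i' = i
    · subst h
      rw [if_pos rfl, getD_set_int _ _ _ _ _ (by omega)]
      by_cases h2 : j' = j
      · subst h2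
        right
        simpa using hres
      · rw [if_neg h2]
        exact hent i' j' hi' hj'
    · rw [if_neg h]
      exact hent i' j' hi' hj' 

lemma loopA_correct (rs ks : List Char) (j : Nat) (hj : j < ks.length) (i : Nat)
    (hdp : ∀ (k : Nat) (mem : List (List Int)), k < rs.length → ValidMem rs ks mem →
      (dpA (buildA rs) ks (rs.length : Int) ks.length (k : Int) (j + 1) mem).1
        = costF rs (ks.drop (j + 1)) (k : Int)
      ∧ ValidMem rs ks (dpA (buildA rs) ks (rs.length : Int) ks.length (k : Int) (j + 1) mem).2) :
    ∀ (lst : List Int) (res : Int) (mem : List (List Int)),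
      (∀ q ∈ lst, ∃ k : Nat, k < rs.length ∧ q = (k : Int)) → ValidMem rs ks mem →
      (loopA (buildA rs) ks (rs.length : Int) ks.length (i : Int) j hj lst res mem).1
        = lst.foldl (fun b q =>
            min b (min |q - (i : Int)| ((rs.length : Int) - |q - (i : Int)|)
                     + costF rs (ks.drop (j + 1)) q + 1)) res
      ∧ ValidMem rs ks (loopA (buildA rs) ks (rs.length : Int) ks.length (i : Int) j hj lst res mem).2 := by
  intro lst
  induction lst with
  | nil =>
    intro res mem _ hv
    simp only [loopA]
    exact ⟨rfl, hv⟩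
  | cons q rest ih =>
    intro res mem hq hv
    obtain ⟨k, hk, rfl⟩ := hq q (by simp)
    simp only [loopA]
    obtain ⟨hval, hv'⟩ := hdp k mem hk hv
    rw [hval]
    obtain ⟨ih1, ih2⟩ := ih _ _ (fun q hqmem => hq q (by simp [hqmem])) hv'
    rw [List.foldl_cons]
    exact ⟨ih1, ih2⟩

lemma dpA_correct (rs ks : List Char) (hpre : ∀ c ∈ ks, c ∈ rs) :
    ∀ (fuel j : Nat), j ≤ ks.length → ks.length - j ≤ fuel → ∀ (i : Nat), i < rs.length →
    ∀ (mem : List (List Int)), ValidMem rs ks mem →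
      (dpA (buildA rs) ks (rs.length : Int) ks.length (i : Int) j mem).1
        = costF rs (ks.drop j) (i : Int)
      ∧ ValidMem rs ks (dpA (buildA rs) ks (rs.length : Int) ks.length (i : Int) j mem).2 := by
  intro fuel
  induction fuel with
  | zero =>
    intro j hj hf i hi mem hv
    have hjn : j = ks.length := by omega
    rw [dpA, if_pos hjn]
    rw [hjn, List.drop_of_length_le (le_refl _)]
    exact ⟨rfl, hv⟩
  | succ fuel ihf =>
    intro j hj hf i hi mem hv
    by_cases hjn : j = ks.length
    · rw [dpA, if_pos hjn]
      rw [hjn, List.drop_of_length_le (le_refl _)]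
      exact ⟨rfl, hv⟩
    · have hlt : j < ks.length := by omega
      rw [dpA, if_neg hjn, dif_pos hlt]
      simp only [PySem.List.pyGetD_natCast]
      have hentdef : (mem.getD i []).getD j 0 = entryM mem i j := rfl
      by_cases hc0 : entryM mem i j = 0
      · rw [if_neg (show ¬((mem.getD i []).getD j 0 ≠ 0) from not_not_intro hc0)]
        have hcj : ks.getD j ' ' = ks[j] := by
          rw [List.getD_eq_getElem?_getD, List.getElem?_eq_getElem hlt]
          rfl
        have hcrs : ks[j] ∈ rs := hpre _ (List.getElem_mem hlt)
        have hlst : (((buildA rs).get? (ks.getD j ' ')).getD []) =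
            dupHead (idxsOf rs ks[j]) := by
          rw [hcj, ← PySem.Dict.getD_eq_get?_getD, buildA_getD]
        rcases hio : idxsOf rs ks[j] with _ | ⟨q, r⟩
        · exact absurd hio (idxsOf_ne_nil hcrs)
        · have hdp : ∀ (k : Nat) (mem : List (List Int)), k < rs.length → ValidMem rs ks mem →
              (dpA (buildA rs) ks (rs.length : Int) ks.length (k : Int) (j + 1) mem).1
                = costF rs (ks.drop (j + 1)) (k : Int)
              ∧ ValidMem rs ks (dpA (buildA rs) ks (rs.length : Int) ks.length (k : Int) (j + 1) mem).2 :=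
            fun k mem hk hv => ihf (j + 1) (by omega) (by omega) k hk mem hv
          have hmemlst : ∀ x ∈ dupHead (idxsOf rs ks[j]), ∃ k : Nat, k < rs.length ∧ x = (k : Int) := by
            intro x hx
            rw [hio] at hx
            simp only [dupHead, List.mem_cons] at hx
            have hxmem : x ∈ idxsOf rs ks[j] := by
              rw [hio]
              rcases hx with h | h | h
              · simp [h]
              · simp [h]
              · simp [h]
            exact mem_idxsOf hxmem
          obtain ⟨hl1, hl2⟩ := loopA_correct rs ks j hlt i hdp
            (((buildA rs).get? (ks.getD j ' ')).getD []) 99999 mem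
            (by rw [hlst]; exact hmemlst) hv
          have hfold : (((buildA rs).get? (ks.getD j ' ')).getD []).foldl
              (fun b q =>
                min b (min |q - (i : Int)| ((rs.length : Int) - |q - (i : Int)|)
                  + costF rs (ks.drop (j + 1)) q + 1)) 99999
              = costF rs (ks.drop j) (i : Int) := by
            rw [hlst, hio]
            simp only [dupHead]
            rw [foldl_min_dup (fun q => min |q - (i : Int)| ((rs.length : Int) - |q - (i : Int)|)
                  + costF rs (ks.drop (j + 1)) q + 1)]
            rw [List.drop_eq_getElem_cons hlt, costF, ← hio, List.foldl_map]
          constructor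
          · simp only []
            rw [hl1, hfold]
          · simp only [PySem.List.pyGetD_natCast, PySem.List.pySetD_natCast]
            apply valid_set rs ks _ i j _ hl2 hi hlt
            rw [hl1, hfold]
      · rw [if_pos (show (mem.getD i []).getD j 0 ≠ 0 from fun h => hc0 h)]
        rcases hv.2.2 i j hi hlt with h | h
        · exact absurd h hc0
        · exact ⟨hentdef.trans h, hv⟩

lemma altFold (rs : List Char) : ∀ (ks : List Char), (∀ c ∈ ks, c ∈ rs) →
    ks.foldr (fun ch cost =>
        (List.range rs.length).map (fun p : Nat =>
          (((buildB rs).get? ch).getD []).foldl (fun best q =>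
            min best (min |(p : Int) - q| ((rs.length : Int) - |(p : Int) - q|)
                        + PySem.List.pyGetD cost q 0 + 1)) 99999))
      (List.replicate rs.length (0 : Int))
    = (List.range rs.length).map (fun p : Nat => costF rs ks (p : Int)) := by
  intro ks
  induction ks with
  | nil =>
    intro _
    rw [List.foldr_nil]
    have : (fun p : Nat => costF rs [] (p : Int)) = Function.const Nat (0 : Int) := by
      funext p; rfl
    rw [this, List.map_const, List.length_range]
  | cons c rest ih =>
    intro hpre
    rw [List.foldr_cons, ih (fun x hx => hpre x (by simp [hx]))]
    apply List.map_congr_left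
    intro p hp
    rw [List.mem_range] at hp
    rw [← PySem.Dict.getD_eq_get?_getD, buildB_getD, costF, List.foldl_map]
    apply PySem.List.foldl_congr_mem
    intro acc q hq
    obtain ⟨k, hk, rfl⟩ := mem_idxsOf hq
    rw [PySem.List.pyGetD_natCast, PySem.List.getD_map_range _ _ _ _ hk,
        abs_sub_comm ((p : Int)) ((k : Int))]

lemma alt_eq_costF (ring key : String) (hpre : Pre_findRotateSteps ring key) (hne : key.toList ≠ []) :
    findRotateSteps_alt ring key = costF ring.toList key.toList 0 := by
  have hpre' : ∀ c ∈ key.toList, c ∈ ring.toList := by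
    simpa [Pre_findRotateSteps, List.all_eq_true] using hpre
  simp only [findRotateSteps_alt]
  rw [if_neg (by simpa [List.isEmpty_iff] using hne)]
  rw [List.foldl_reverse]
  have h : List.foldr
      (fun ch cost =>
        (List.range ring.toList.length).map (fun p : Nat =>
          (((buildB ring.toList).get? ch).getD []).foldl (fun best q =>
            min best (min |(p : Int) - q| ((ring.toList.length : Int) - |(p : Int) - q|)
                        + PySem.List.pyGetD cost q 0 + 1)) 99999))
      (List.replicate ring.toList.length (0 : Int)) key.toList
      = (List.range ring.toList.length).map (fun p : Nat => costF ring.toList key.toList (p : Int)) :=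
    altFold ring.toList key.toList hpre'
  rw [show (0 : Int) = ((0 : Nat) : Int) from rfl] at h ⊢
  rw [h, PySem.List.pyGetD_natCast]
  have hm : 0 < ring.toList.length := by
    obtain ⟨c, hc⟩ := List.exists_mem_of_ne_nil key.toList hne
    exact List.length_pos_of_mem (hpre' c hc)
  rw [PySem.List.getD_map_range _ _ _ _ hm]

lemma a_eq_costF (ring key : String) (hpre : Pre_findRotateSteps ring key) :
    findRotateSteps ring key = costF ring.toList key.toList 0 := by
  have hpre' : ∀ c ∈ key.toList, c ∈ ring.toList := by
    simpa [Pre_findRotateSteps, List.all_eq_true] using hpre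
  simp only [findRotateSteps]
  by_cases hks : key.toList = []
  · rw [hks, dpA, if_pos (by simp)]
    rfl
  · have hm : 0 < ring.toList.length := by
      obtain ⟨c, hc⟩ := List.exists_mem_of_ne_nil key.toList hks
      exact List.length_pos_of_mem (hpre' c hc)
    have hv : ValidMem ring.toList key.toList
        (List.replicate ring.toList.length (List.replicate key.toList.length 0)) := by
      refine ⟨by simp, ?_, ?_⟩
      · intro r hr
        rw [List.eq_of_mem_replicate hr]
        simp
      · intro i j hi hj
        left
        unfold entryM
        rw [List.getD_replicate _ hi, List.getD_replicate _ hj]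
    have hmain := (dpA_correct ring.toList key.toList hpre' key.toList.length 0 (by omega)
      (by omega) 0 hm _ hv).1
    simpa using hmain


-- ===== VERDICT (by name: the statement is the Claim_ definition above) =====
theorem findRotateSteps_spec : Claim_equal_findRotateSteps := by
  intro ring key _ hpre
  unfold Spec_findRotateSteps
  by_cases hne : key.toList = []
  · rw [a_eq_costF ring key hpre]
    simp only [findRotateSteps_alt]
    rw [if_pos (by simpa [List.isEmpty_iff] using hne), hne]
    rfl
  · rw [a_eq_costF ring key hpre, alt_eq_costF ring key hpre hne]
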